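-- pv_equiv track=rewrite | github.com/snake727/NTNU | Python (UiT)/Python/Misc/Primtalloppgave.py | isPrimeReversed
-- ===== SOURCE A (Python) =====
-- def isPrimeReversed(n):
--     reversed_n = 0
--     while n != 0:
--         digit = n % 10
--         reversed_n = reversed_n * 10 + digit
--         n //= 10
--
--     if reversed_n <= 1:
--         return False
--     for i in range(2, reversed_n):
--         if reversed_n % i == 0:
--             return False
--     return True
-- ===== SOURCE B (Python) =====
-- def isPrimeReversed(n):
--     reversed_n = 0
--     while n != 0:
--         digit = n % 10
--         reversed_n = reversed_n * 10 + digit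
--         n //= 10
--
--     if reversed_n < 2:
--         return False
--     if reversed_n % 2 == 0:
--         return reversed_n == 2
--     i = 3
--     while i * i <= reversed_n:
--         if reversed_n % i == 0:
--             return False
--         i += 2
--     return True
-- ===== Notes on version B (the rewrite author's own statement) =====
-- stated objective: faster
-- what changed: After the same arithmetic digit-reversal, B replaces A's trial division over every candidate in range(2, r) with an even test plus odd trial division only while i*i <= r.
import Mathlib
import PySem

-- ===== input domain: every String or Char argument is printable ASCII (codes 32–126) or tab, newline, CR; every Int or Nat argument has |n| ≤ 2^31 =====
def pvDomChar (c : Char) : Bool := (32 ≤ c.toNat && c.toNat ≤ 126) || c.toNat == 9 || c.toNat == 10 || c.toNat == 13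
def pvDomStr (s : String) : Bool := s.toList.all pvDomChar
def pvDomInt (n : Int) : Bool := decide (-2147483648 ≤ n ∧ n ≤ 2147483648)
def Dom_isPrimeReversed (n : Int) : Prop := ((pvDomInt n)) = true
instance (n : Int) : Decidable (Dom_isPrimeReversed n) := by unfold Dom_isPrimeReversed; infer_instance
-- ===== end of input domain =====

-- B keeps A's arithmetic digit-reversal loop and replaces A's trial division over all of
-- range(2, r) with an even test plus odd trial division only while i*i <= r (objective: faster).

-- ===== PORT A =====
-- termination helper for the loops below
theorem pv_le_mul_self (i : Int) : i ≤ i * i := by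
  rcases le_or_gt i 0 with h | h
  · exact h.trans (mul_self_nonneg i)
  · nlinarith

-- shared digit-reversal while-loop (identical in A and B); for n < 0 the Python loops
-- forever (excluded by Pre_), the port returns acc there.
def revLoop (n acc : Int) : Int :=
  if n = 0 then acc
  else if n < 0 then acc
  else revLoop (PySem.Int.floordiv n 10) (acc * 10 + PySem.Int.mod n 10)
termination_by n.toNat
decreasing_by
  rename_i h0 hneg
  rw [PySem.Int.floordiv_eq_ediv_of_pos (by omega)]
  omega

-- A's `for i in range(2, reversed_n)` trial-division loop
def trialLoop (r i : Int) : Bool :=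
  if i < r then
    if PySem.Int.mod r i = 0 then false else trialLoop r (i + 1)
  else true
termination_by (r - i).toNat
decreasing_by omega

def isPrimeReversed (n : Int) : Bool :=
  let reversed_n := revLoop n 0
  if reversed_n ≤ 1 then false
  else trialLoop reversed_n 2

-- ===== PORT B =====
-- B's `while i * i <= reversed_n` odd-step loop
def oddLoop (r i : Int) : Bool :=
  if i * i ≤ r then
    if PySem.Int.mod r i = 0 then false else oddLoop r (i + 2)
  else true
termination_by (r + 1 - i).toNat
decreasing_by
  rename_i h _
  have := pv_le_mul_self i
  omega

def isPrimeReversed_alt (n : Int) : Bool :=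
  let reversed_n := revLoop n 0
  if reversed_n < 2 then false
  else if PySem.Int.mod reversed_n 2 = 0 then reversed_n == 2
  else oddLoop reversed_n 3

-- ===== PRECONDITION & SPEC =====
-- Pre_ excludes n < 0: there the Python A never returns (n //= 10 stalls at -1, an infinite loop).
def Pre_isPrimeReversed (n : Int) : Prop := 0 ≤ n
instance (n : Int) : Decidable (Pre_isPrimeReversed n) := by unfold Pre_isPrimeReversed; infer_instance
def pvWitness_isPrimeReversed : Int := (37)

def Spec_isPrimeReversed (n : Int) (out : Bool) : Prop := out = isPrimeReversed_alt n
instance (n : Int) (out : Bool) : Decidable (Spec_isPrimeReversed n out) := by unfold Spec_isPrimeReversed; infer_instance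

-- ===== CLAIM (what is proved, stated in full; the proofs are below) =====
def Claim_equal_isPrimeReversed : Prop := ∀ (n : Int), Dom_isPrimeReversed n → Pre_isPrimeReversed n → Spec_isPrimeReversed n (isPrimeReversed n)

-- ===== LEMMAS AND PROOFS =====

theorem revLoop_nonneg : ∀ (n acc : Int), 0 ≤ acc → 0 ≤ revLoop n acc := by
  intro n acc
  induction n, acc using revLoop.induct with
  | case1 acc => intro hacc; rw [revLoop]; simpa using hacc
  | case2 n acc h0 hneg => intro hacc; rw [revLoop]; simp [h0, hneg, hacc]
  | case3 n acc h0 hneg ih =>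
    intro hacc
    rw [revLoop]
    simp only [h0, hneg, if_false]
    apply ih
    have hm : PySem.Int.mod n 10 = n % 10 := PySem.Int.mod_eq_emod_of_pos (by omega)
    have := Int.emod_nonneg n (by norm_num : (10:Int) ≠ 0)
    omega

theorem trialLoop_iff (r i : Int) :
    1 ≤ i → (trialLoop r i = true ↔ ∀ j, i ≤ j → j < r → ¬ j ∣ r) := by
  induction i using trialLoop.induct with
  | r => exact r
  | case1 i hlt hmod =>
    intro hi
    rw [trialLoop]
    simp only [hlt, if_true, hmod, if_true]
    constructor
    · intro h; exact absurd h (by simp)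
    · intro h
      exact absurd ((PySem.Int.mod_eq_zero_iff_dvd r i).mp hmod) (h i le_rfl hlt)
  | case2 i hlt hmod ih =>
    intro hi
    rw [trialLoop]
    simp only [hlt, if_true, hmod, if_false]
    rw [ih (by omega)]
    constructor
    · intro h j hij hjr hdvd
      rcases eq_or_lt_of_le hij with rfl | hlt2
      · exact ((PySem.Int.mod_eq_zero_iff_dvd r i).not.mp hmod) hdvd
      · exact h j (by omega) hjr hdvd
    · intro h j hij hjr hdvd
      exact h j (by omega) hjr hdvd
  | case3 i hlt =>
    intro hi
    rw [trialLoop]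
    simp only [hlt, if_false]
    constructor
    · intro _ j hij hjr; omega
    · intro _; trivial

theorem oddLoop_iff (r i : Int) :
    1 ≤ i → (oddLoop r i = true ↔ ∀ j, i ≤ j → (j - i) % 2 = 0 → j * j ≤ r → ¬ j ∣ r) := by
  induction i using oddLoop.induct with
  | r => exact r
  | case1 i hle hmod =>
    intro hi
    rw [oddLoop]
    simp only [hle, if_true, hmod, if_true]
    constructor
    · intro h; exact absurd h (by simp)
    · intro h
      exact absurd ((PySem.Int.mod_eq_zero_iff_dvd r i).mp hmod) (h i le_rfl (by omega) hle)
  | case2 i hle hmod ih =>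
    intro hi
    rw [oddLoop]
    simp only [hle, if_true, hmod, if_false]
    rw [ih (by omega)]
    constructor
    · intro h j hij hpar hsq hdvd
      rcases eq_or_lt_of_le hij with rfl | hlt2
      · exact ((PySem.Int.mod_eq_zero_iff_dvd r i).not.mp hmod) hdvd
      · exact h j (by omega) (by omega) hsq hdvd
    · intro h j hij hpar hsq hdvd
      exact h j (by omega) (by omega) hsq hdvd
  | case3 i hle =>
    intro hi
    rw [oddLoop]
    simp only [hle, if_false]
    constructor
    · intro _ j hij hpar hsq
      exfalso
      have : i * i ≤ j * j := mul_le_mul hij hij (by omega) (by omega)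
      omega
    · intro _; trivial

-- the number-theoretic core: for r ≥ 2, full trial division agrees with the even test
-- plus odd trial division up to the square root
theorem crux (r : Int) (h2 : 2 ≤ r) :
    trialLoop r 2 = if PySem.Int.mod r 2 = 0 then (r == 2 : Bool) else oddLoop r 3 := by
  have hmod2 : PySem.Int.mod r 2 = r % 2 := PySem.Int.mod_eq_emod_of_pos (by omega)
  by_cases hpar : PySem.Int.mod r 2 = 0
  · simp only [hpar, if_true]
    by_cases hr2 : r = 2
    · subst hr2; rw [trialLoop]; norm_num
    · have hdvd : (2:Int) ∣ r := (PySem.Int.mod_eq_zero_iff_dvd r 2).mp hpar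
      have hfalse : trialLoop r 2 = false := by
        rw [Bool.eq_false_iff]
        intro h
        exact ((trialLoop_iff r 2 (by omega)).mp h) 2 le_rfl (by omega) hdvd
      rw [hfalse]
      simp [hr2]
  · simp only [hpar, if_false]
    have hodd : r % 2 = 1 := by
      have := Int.emod_two_eq r; omega
    rw [Bool.eq_iff_iff, trialLoop_iff r 2 (by omega), oddLoop_iff r 3 (by omega)]
    constructor
    · intro h j h3 hparj hsq hdvd
      have h3j : 3 * j ≤ j * j := mul_le_mul_of_nonneg_right h3 (by omega)
      exact h j (by omega) (by omega) hdvd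
    · intro h j hj2 hjr hdvd
      set R := r.toNat with hRdef
      have hrR : (R : Int) = r := Int.toNat_of_nonneg (by omega)
      have hjR : j.toNat ∣ R := by
        rw [← Int.natCast_dvd_natCast]
        rw [hrR, Int.toNat_of_nonneg (by omega : (0:Int) ≤ j)]
        exact hdvd
      have hRnp : ¬ R.Prime := by
        intro hp
        exact (Nat.prime_def_lt'.mp hp).2 j.toNat (by omega) (by omega) hjR
      have hR1 : R ≠ 1 := by omega
      have hpp : R.minFac.Prime := Nat.minFac_prime hR1
      have hdp : R.minFac ∣ R := Nat.minFac_dvd R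
      have hsq : R.minFac ^ 2 ≤ R := Nat.minFac_sq_le_self (by omega) hRnp
      have hne2 : R.minFac ≠ 2 := by
        intro he
        have h2r : (2:Int) ∣ r := by
          have : ((R.minFac : Int)) ∣ (R : Int) := Int.natCast_dvd_natCast.mpr hdp
          rw [he, hrR] at this
          exact_mod_cast this
        have := Int.emod_emod_of_dvd r (dvd_refl 2)
        omega
      have hpodd : R.minFac % 2 = 1 := Nat.odd_iff.mp (hpp.odd_of_ne_two hne2)
      have hp2 : 2 ≤ R.minFac := hpp.two_le
      apply h (R.minFac : Int) (by omega) (by omega)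
      · rw [← hrR]
        have : R.minFac * R.minFac ≤ R := by nlinarith
        exact_mod_cast this
      · rw [← hrR]
        exact_mod_cast Int.natCast_dvd_natCast.mpr hdp

-- ===== VERDICT (by name: the statement is the Claim_ definition above) =====
theorem isPrimeReversed_spec : Claim_equal_isPrimeReversed := by
  intro n _ hpre
  unfold Spec_isPrimeReversed isPrimeReversed isPrimeReversed_alt
  have hr0 : 0 ≤ revLoop n 0 := revLoop_nonneg n 0 le_rfl
  set r := revLoop n 0 with hrdef
  by_cases hr : r ≤ 1
  · simp [hr, show r < 2 by omega]
  · simp only [hr, if_false, show ¬ r < 2 by omega, if_false]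
    exact crux r (by omega)
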